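-- pv_equiv track=rewrite | github.com/dimakiss/Project-Eluer-Solutions | Python/P041.py | get_numers
-- ===== SOURCE A (Python) =====
-- def get_numers(len,lst,number=None,d=None):
--     if number is None:
--         return get_numers(len,lst,"",{})
--     if len==1:
--         for i in lst:
--             d[(number+i)]=d.__len__()
--     for i in lst:
--         temp_lst=lst.copy()
--         temp_lst.remove(i)
--         get_numers(len-1,temp_lst,number+i,d)
--     return d
-- ===== SOURCE B (Python) =====
-- # Iterative level-wise expansion (explicit worklist) instead of A's DFS recursion.
-- # Mutates the passed-in dict d in place exactly as A does (return-value equivalence is what is proved).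
-- def get_numers(len, lst, number=None, d=None):
--     if number is None:
--         number, d = "", {}
--     if len >= 1:
--         frontier = [(number, lst)]
--         for _ in range(len - 1):
--             if not frontier:
--                 break
--             nxt = []
--             for num, rest in frontier:
--                 for x in rest:
--                     sub = rest.copy()
--                     sub.remove(x)
--                     nxt.append((num + x, sub))
--             frontier = nxt
--         for num, rest in frontier:
--             for x in rest:
--                 d[num + x] = d.__len__()
--     return d
-- ===== Notes on version B (the rewrite author's own statement) =====
-- stated objective: alternative
-- what changed: Replaced A's depth-first recursion (which re-descends the choice tree and inserts at len==1 nodes) by an iterative level-wise worklist: a frontier of (prefix, remaining) pairs expanded len-1 times with an early break on an empty frontier, followed by a single final insertion loop.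
-- outside the precondition, e.g. on get_numers(0, [], 'x', None): A returns None, B returns None; on get_numers(1, ['a'], 'x', None): A raises AttributeError, B raises AttributeError
import Mathlib
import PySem

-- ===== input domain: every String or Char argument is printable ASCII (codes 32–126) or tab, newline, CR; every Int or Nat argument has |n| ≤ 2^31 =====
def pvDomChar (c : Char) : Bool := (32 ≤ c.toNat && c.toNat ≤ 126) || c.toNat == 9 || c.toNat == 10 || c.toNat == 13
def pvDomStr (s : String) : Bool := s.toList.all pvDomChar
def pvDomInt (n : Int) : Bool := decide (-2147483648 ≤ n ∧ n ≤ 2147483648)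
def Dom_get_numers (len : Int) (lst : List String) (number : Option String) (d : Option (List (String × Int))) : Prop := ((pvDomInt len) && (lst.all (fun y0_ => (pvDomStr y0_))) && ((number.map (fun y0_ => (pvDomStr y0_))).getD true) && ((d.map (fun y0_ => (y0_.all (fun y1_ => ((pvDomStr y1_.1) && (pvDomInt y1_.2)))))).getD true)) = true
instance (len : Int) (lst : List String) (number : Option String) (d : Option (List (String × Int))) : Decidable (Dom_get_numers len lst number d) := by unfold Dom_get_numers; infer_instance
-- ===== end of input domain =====

-- B replaces A's DFS recursion by an iterative level-wise frontier expansion; equivalence is about the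
-- RETURN value only (both Pythons mutate the passed-in dict d in place in the same way).

-- ===== PORT A =====
-- d.__len__() = PySem.Dict.size; temp_lst.copy()+remove(i) = List.erase (drops the first '=='-equal
-- element; i ∈ lst here, so Python's ValueError is unreachable); fuel = lst.length totalizes the
-- recursion exactly (when fuel = 0 then lst = [] and both of A's loops do nothing, returning d).
def get_numers_go (fuel : Nat) (len : Int) (lst : List String) (number : String) (d : PySem.Dict String Int) : PySem.Dict String Int :=
  match fuel with
  | 0 => d
  | k+1 =>
    let d1 := if len = 1 then lst.foldl (fun acc i => acc.insert (number ++ i) (acc.size : Int)) d else d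
    lst.foldl (fun acc i => get_numers_go k (len - 1) (lst.erase i) (number ++ i) acc) d1

def get_numers (len : Int) (lst : List String) (number : Option String) (d : Option (List (String × Int))) : List (String × Int) :=
  match number with
  | none => (get_numers_go lst.length len lst "" PySem.Dict.empty).items   -- 'return get_numers(len,lst,"",{})'
  | some num => (get_numers_go lst.length len lst num (PySem.Dict.mk (d.getD []))).items
    -- d = none with number given makes Python raise / return None: outside Pre_get_numers

-- ===== PORT B =====
def get_numers_altStep (frontier : List (String × List String)) : List (String × List String) :=
  frontier.flatMap (fun p => p.2.map (fun x => (p.1 ++ x, p.2.erase x)))   -- sub = rest.copy(); sub.remove(x)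

-- 'for _ in range(len-1): if not frontier: break; frontier = step(frontier)'
def get_numers_altExpand : Nat → List (String × List String) → List (String × List String)
  | 0, f => f
  | k+1, f => if f = [] then f else get_numers_altExpand k (get_numers_altStep f)

def get_numers_alt (len : Int) (lst : List String) (number : Option String) (d : Option (List (String × Int))) : List (String × Int) :=
  let nd : String × PySem.Dict String Int :=
    match number with
    | none => ("", PySem.Dict.empty)                     -- 'number, d = "", {}'
    | some num => (num, PySem.Dict.mk (d.getD []))
  if 1 ≤ len then
    let frontier := get_numers_altExpand (len - 1).toNat [(nd.1, lst)]
    (frontier.foldl (fun acc p => p.2.foldl (fun a x => a.insert (p.1 ++ x) (a.size : Int)) acc) nd.2).items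
  else nd.2.items

-- ===== PRECONDITION & SPEC =====
-- Pre_ excludes only calls with number given but d=None: there Python A raises a TypeError
-- (if 1 ≤ len and the expansion reaches an insertion) or returns None, which is not a dict.
def Pre_get_numers (len : Int) (lst : List String) (number : Option String) (d : Option (List (String × Int))) : Prop :=
  number = none ∨ d ≠ none
instance (len : Int) (lst : List String) (number : Option String) (d : Option (List (String × Int))) : Decidable (Pre_get_numers len lst number d) := by unfold Pre_get_numers; infer_instance

def pvWitness_get_numers : Int × List String × Option String × (Option (List (String × Int))) := (2, ["a", "b"], none, none)

def Spec_get_numers (len : Int) (lst : List String) (number : Option String) (d : Option (List (String × Int))) (out : List (String × Int)) : Prop := out = get_numers_alt len lst number d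
instance (len : Int) (lst : List String) (number : Option String) (d : Option (List (String × Int))) (out : List (String × Int)) : Decidable (Spec_get_numers len lst number d out) := by unfold Spec_get_numers; infer_instance

-- ===== CLAIM (what is proved, stated in full; the proofs are below) =====
def Claim_equal_get_numers : Prop := ∀ (len : Int) (lst : List String) (number : Option String) (d : Option (List (String × Int))), Dom_get_numers len lst number d → Pre_get_numers len lst number d → Spec_get_numers len lst number d (get_numers len lst number d)

-- ===== LEMMAS AND PROOFS =====

-- the sequence of keys A inserts, at recursion depth r+1 (= Python's len)
def pvKeys : Nat → List String → String → List String
  | 0, lst, number => lst.map (fun i => number ++ i)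
  | r+1, lst, number => lst.flatMap (fun i => pvKeys r (lst.erase i) (number ++ i))

def pvIns (acc : PySem.Dict String Int) (k : String) : PySem.Dict String Int := acc.insert k (acc.size : Int)

theorem pvKeys_nil (r : Nat) (number : String) : pvKeys r [] number = [] := by
  cases r <;> simp [pvKeys]

theorem pv_foldl_fix {α β : Type} (l : List α) (f : β → α → β) (init : β)
    (h : ∀ acc, ∀ x ∈ l, f acc x = acc) : l.foldl f init = init := by
  rw [PySem.List.foldl_congr_mem l f (fun acc _ => acc) init h]
  induction l generalizing init with
  | nil => rfl
  | cons a t ih => exact ih init (fun acc x hx => h acc x (List.mem_cons_of_mem a hx))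

theorem get_numers_go_nonpos (fuel : Nat) : ∀ (len : Int) (lst : List String) (number : String)
    (d : PySem.Dict String Int), len ≤ 0 → get_numers_go fuel len lst number d = d := by
  induction fuel with
  | zero => intro len lst number d _; rfl
  | succ k ih =>
    intro len lst number d hlen
    show (lst.foldl _ (if len = 1 then _ else d)) = d
    rw [if_neg (by omega)]
    exact pv_foldl_fix _ _ _ (fun acc x _ => ih (len - 1) (lst.erase x) (number ++ x) acc (by omega))

theorem get_numers_go_keys (fuel : Nat) : ∀ (lst : List String), lst.length = fuel →
    ∀ (len : Int) (number : String) (d : PySem.Dict String Int), 1 ≤ len →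
    get_numers_go fuel len lst number d = (pvKeys (len - 1).toNat lst number).foldl pvIns d := by
  induction fuel with
  | zero =>
    intro lst h len number d _
    rw [List.length_eq_zero_iff] at h
    subst h
    rw [pvKeys_nil]; rfl
  | succ k ih =>
    intro lst h len number d hlen
    by_cases hl : len = 1
    · subst hl
      show (lst.foldl _ (if (1 : Int) = 1 then lst.foldl (fun acc i => acc.insert (number ++ i) (acc.size : Int)) d else d)) = _
      rw [if_pos rfl]
      have hfix : lst.foldl (fun acc i => get_numers_go k (1 - 1) (lst.erase i) (number ++ i) acc)
          (lst.foldl (fun acc i => acc.insert (number ++ i) (acc.size : Int)) d)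
          = lst.foldl (fun acc i => acc.insert (number ++ i) (acc.size : Int)) d :=
        pv_foldl_fix _ _ _ (fun acc x _ => get_numers_go_nonpos k (1 - 1) (lst.erase x) (number ++ x) acc (by omega))
      rw [hfix]
      show _ = (pvKeys (0 : Nat) lst number).foldl pvIns d
      rw [pvKeys, List.foldl_map]
      rfl
    · have h2 : 2 ≤ len := by omega
      show (lst.foldl (fun acc i => get_numers_go k (len - 1) (lst.erase i) (number ++ i) acc)
        (if len = 1 then _ else d)) = _
      rw [if_neg hl]
      have hcongr : lst.foldl (fun acc i => get_numers_go k (len - 1) (lst.erase i) (number ++ i) acc) d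
          = lst.foldl (fun acc i => (pvKeys (len - 2).toNat (lst.erase i) (number ++ i)).foldl pvIns acc) d := by
        refine PySem.List.foldl_congr_mem _ _ _ _ (fun acc x hx => ?_)
        have hlen' : (lst.erase x).length = k := by
          rw [List.length_erase_of_mem hx, h]
          omega
        have hthis := ih (lst.erase x) hlen' (len - 1) (number ++ x) acc (by omega)
        have e : (len - 1 - 1).toNat = (len - 2).toNat := by omega
        rw [hthis, e]
      rw [hcongr]
      have ht : (len - 1).toNat = (len - 2).toNat + 1 := by omega
      rw [ht, pvKeys, List.foldl_flatMap]

theorem pv_expand_keys (r : Nat) : ∀ (f : List (String × List String)),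
    (get_numers_altExpand r f).flatMap (fun p => p.2.map (fun x => p.1 ++ x))
      = f.flatMap (fun p => pvKeys r p.2 p.1) := by
  induction r with
  | zero => intro f; simp [get_numers_altExpand, pvKeys]
  | succ k ih =>
    intro f
    show (if f = [] then f else get_numers_altExpand k (get_numers_altStep f)).flatMap _ = _
    by_cases hf : f = []
    · subst hf; simp
    · rw [if_neg hf, ih]
      simp only [get_numers_altStep, List.flatMap_assoc, List.flatMap_map]
      congr 1

theorem pv_alt_fold (f : List (String × List String)) (d : PySem.Dict String Int) :
    f.foldl (fun acc p => p.2.foldl (fun a x => a.insert (p.1 ++ x) (a.size : Int)) acc) d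
      = (f.flatMap (fun p => p.2.map (fun x => p.1 ++ x))).foldl pvIns d := by
  rw [List.foldl_flatMap]
  refine PySem.List.foldl_congr_mem _ _ _ _ (fun acc p _ => ?_)
  rw [List.foldl_map]
  rfl

theorem pv_main (len : Int) (lst : List String) (num : String) (d0 : PySem.Dict String Int) :
    get_numers_go lst.length len lst num d0
      = (if 1 ≤ len then
          ((get_numers_altExpand (len - 1).toNat [(num, lst)]).foldl
            (fun acc p => p.2.foldl (fun a x => a.insert (p.1 ++ x) (a.size : Int)) acc) d0)
         else d0) := by
  by_cases hlen : 1 ≤ len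
  · rw [if_pos hlen, pv_alt_fold, pv_expand_keys,
      get_numers_go_keys lst.length lst rfl len num d0 hlen]
    simp
  · rw [if_neg hlen, get_numers_go_nonpos lst.length len lst num d0 (by omega)]

-- ===== VERDICT (by name: the statement is the Claim_ definition above) =====
theorem get_numers_spec : Claim_equal_get_numers := by
  intro len lst number d _ _
  show get_numers len lst number d = get_numers_alt len lst number d
  cases number with
  | none =>
    show (get_numers_go lst.length len lst "" PySem.Dict.empty).items = _
    rw [pv_main]
    simp only [get_numers_alt]
    split <;> rfl
  | some num =>
    show (get_numers_go lst.length len lst num (PySem.Dict.mk (d.getD []))).items = _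
    rw [pv_main]
    simp only [get_numers_alt]
    split <;> rfl
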